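-- pv_equiv track=rewrite | github.com/luoingly/attack-scripts | misc/usb-keyboard-traffic.py | _parse_capslock
-- ===== SOURCE A (Python) =====
-- def _parse_capslock(source: list[str]) -> list[str]:
--     # parse capslock
--     result, caps = [], False
--     for i in source:
--         if i == '<CAP>':
--             caps = not caps
--         else:
--             result.append((i.lower() if i.isupper() else i.upper())
--                           if caps and len(i) == 1 else i)
--     return result
-- ===== SOURCE B (Python) =====
-- def _swap(i: str) -> str:
--     # case-swap a single key, leaving multi-char keys (e.g. '<SPACE>') alone
--     return (i.lower() if i.isupper() else i.upper()) if len(i) == 1 else i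
--
--
-- def _parse_capslock(source: list[str]) -> list[str]:
--     # Split at '<CAP>' markers (keeping empty segments), then case-swap the
--     # odd-indexed segments: segment k is typed with capslock on iff k is odd.
--     segments, cur = [], []
--     for i in source:
--         if i == '<CAP>':
--             segments.append(cur)
--             cur = []
--         else:
--             cur.append(i)
--     segments.append(cur)
--     out = []
--     for k, seg in enumerate(segments):
--         if k % 2 == 1:
--             out.extend(_swap(i) for i in seg)
--         else:
--             out.extend(seg)
--     return out
-- ===== Notes on version B (the rewrite author's own statement) =====
-- stated objective: alternative
-- what changed: B replaces A's single pass with a mutable caps flag by a split-at-marker decomposition: it cuts the input into segments at each '<CAP>' (keeping empty segments), then emits each segment as-is or case-swapped according to the parity of its index.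
import Mathlib
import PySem

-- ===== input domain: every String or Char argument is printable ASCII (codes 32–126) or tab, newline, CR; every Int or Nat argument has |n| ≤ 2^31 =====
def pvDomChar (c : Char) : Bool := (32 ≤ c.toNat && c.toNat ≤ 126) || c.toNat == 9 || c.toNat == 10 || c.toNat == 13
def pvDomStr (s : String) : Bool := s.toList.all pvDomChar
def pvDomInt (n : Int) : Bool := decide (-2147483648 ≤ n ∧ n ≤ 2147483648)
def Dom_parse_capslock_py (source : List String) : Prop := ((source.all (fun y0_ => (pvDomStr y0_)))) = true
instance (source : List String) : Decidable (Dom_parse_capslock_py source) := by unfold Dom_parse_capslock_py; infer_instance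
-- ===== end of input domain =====

-- B differs from A in decomposition only: it splits the input at '<CAP>' markers and
-- case-swaps the odd-indexed segments instead of carrying a mutable caps flag; same value.

-- Python str.isupper(), exact on ASCII: at least one cased (= alphabetic) character
-- and no lowercase character.  (Shared helper: both Pythons use the same expression.)
def pyIsupper (s : String) : Bool :=
  s.toList.any PySem.Chars.isalpha && s.toList.all (fun c => ! PySem.Chars.islower c)

-- ===== PORT A =====
def parse_capslock_py (source : List String) : List String :=
  (source.foldl
    (fun (st : List String × Bool) i =>
      if i == "<CAP>" then (st.1, !st.2)
      else (st.1 ++ [if st.2 && (PySem.Str.len i == 1)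
                     then (if pyIsupper i then PySem.Str.lower i else PySem.Str.upper i)
                     else i], st.2))
    ([], false)).1

-- ===== PORT B =====
-- Source B's helper _swap
def pvSwap (i : String) : String :=
  if PySem.Str.len i == 1
  then (if pyIsupper i then PySem.Str.lower i else PySem.Str.upper i)
  else i

-- Source B's first loop: cut into segments at '<CAP>', keeping empty segments
def pvSplitCap (cur : List String) : List String → List (List String)
  | [] => [cur]
  | i :: rest => if i == "<CAP>" then cur :: pvSplitCap [] rest else pvSplitCap (cur ++ [i]) rest

def parse_capslock_py_alt (source : List String) : List String :=
  (PySem.List.enumerate (pvSplitCap [] source) 0).foldl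
    (fun (out : List String) (p : Int × List String) =>
      if PySem.Int.mod p.1 2 == 1 then out ++ p.2.map pvSwap else out ++ p.2) []

-- ===== PRECONDITION & SPEC =====
def Spec_parse_capslock_py (source : List String) (out : List String) : Prop := out = parse_capslock_py_alt source
instance (source : List String) (out : List String) : Decidable (Spec_parse_capslock_py source out) := by unfold Spec_parse_capslock_py; infer_instance

-- ===== CLAIM (what is proved, stated in full; the proofs are below) =====
def Claim_equal_parse_capslock_py : Prop := ∀ (source : List String), Dom_parse_capslock_py source → Spec_parse_capslock_py source (parse_capslock_py source)

-- ===== LEMMAS AND PROOFS =====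

-- A's loop body, named for the proofs
def pvStepA (st : List String × Bool) (i : String) : List String × Bool :=
  if i == "<CAP>" then (st.1, !st.2)
  else (st.1 ++ [if st.2 && (PySem.Str.len i == 1)
                 then (if pyIsupper i then PySem.Str.lower i else PySem.Str.upper i)
                 else i], st.2)

-- B's second-loop body, named for the proofs
def pvStepB (out : List String) (p : Int × List String) : List String :=
  if PySem.Int.mod p.1 2 == 1 then out ++ p.2.map pvSwap else out ++ p.2

-- reference recursion: the output of the remaining input given the current caps state
def pvSpecFn (caps : Bool) : List String → List String
  | [] => []
  | i :: rest =>
    if i == "<CAP>" then pvSpecFn (!caps) rest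
    else (if caps then pvSwap i else i) :: pvSpecFn caps rest

theorem foldA (src : List String) : ∀ (acc : List String) (caps : Bool),
    (src.foldl pvStepA (acc, caps)).1 = acc ++ pvSpecFn caps src := by
  induction src with
  | nil => intro acc caps; simp [pvSpecFn]
  | cons i rest ih =>
    intro acc caps
    rw [List.foldl_cons]
    cases hB : (i == "<CAP>") with
    | true =>
      rw [show pvStepA (acc, caps) i = (acc, !caps) from by simp [pvStepA, hB], ih]
      simp [pvSpecFn, hB]
    | false =>
      rw [show pvStepA (acc, caps) i = (acc ++ [if caps then pvSwap i else i], caps) from by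
        cases caps <;> simp [pvStepA, hB, pvSwap], ih]
      simp [pvSpecFn, hB]

theorem foldB (src : List String) : ∀ (cur out : List String) (k : ℕ),
    (PySem.List.enumerate (pvSplitCap cur src) (k : Int)).foldl pvStepB out
    = out ++ (if k % 2 == 1 then cur.map pvSwap else cur) ++ pvSpecFn (k % 2 == 1) src := by
  induction src with
  | nil =>
    intro cur out k
    have hmod : ((k : Int) % 2 = 1) ↔ (k % 2 = 1) := by omega
    simp [pvSplitCap, PySem.List.enumerate_cons, PySem.List.enumerate_nil,
          pvStepB, pvSpecFn, PySem.Int.mod, Int.fmod_eq_emod, hmod]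
    by_cases hp : k % 2 = 1 <;> simp [hp]
  | cons i rest ih =>
    intro cur out k
    have hmod : ((k : Int) % 2 = 1) ↔ (k % 2 = 1) := by omega
    have hk1 : ((k : Int) + 1) = ((k + 1 : ℕ) : Int) := by push_cast; ring
    have hpar : ((k + 1) % 2 == 1) = (!(k % 2 == 1)) := by
      by_cases hp : k % 2 = 1
      · simp [hp, Nat.add_mod]
      · have h0 : k % 2 = 0 := by omega
        simp [h0, Nat.add_mod]
    cases hB : (i == "<CAP>") with
    | true =>
      rw [show pvSplitCap cur (i :: rest) = cur :: pvSplitCap [] rest from by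
            simp [pvSplitCap, hB],
          PySem.List.enumerate_cons, List.foldl_cons, hk1, ih, hpar]
      simp [pvStepB, pvSpecFn, hB, PySem.Int.mod, Int.fmod_eq_emod, hmod]
      by_cases hp : k % 2 = 1 <;> simp [hp]
    | false =>
      rw [show pvSplitCap cur (i :: rest) = pvSplitCap (cur ++ [i]) rest from by
            simp [pvSplitCap, hB],
          ih]
      simp [pvSpecFn, hB]
      by_cases hp : k % 2 = 1 <;> simp [hp]

-- ===== VERDICT (by name: the statement is the Claim_ definition above) =====
theorem parse_capslock_py_spec : Claim_equal_parse_capslock_py := by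
  intro source _
  unfold Spec_parse_capslock_py
  show (source.foldl pvStepA ([], false)).1
     = (PySem.List.enumerate (pvSplitCap [] source) ((0 : ℕ) : Int)).foldl pvStepB []
  rw [foldA, foldB]
  simp
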